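-- pv_equiv track=rewrite | github.com/prsnt558908/CodeZymSolutions | q63-sequential-workload/solution-2-python/Solution.py | getMaxWorkloadDone
-- ===== SOURCE A (Python) =====
-- from typing import List
--
-- def getMaxWorkloadDone(performance: List[int], workload: List[int]) -> List[int]:
--     n = len(workload)
--
--     # Prefix sums (Python int is unbounded, acts like Java long here)
--     prefix = [0] * (n + 1)
--     s = 0
--     for i, w in enumerate(workload):
--         s += int(w)
--         prefix[i + 1] = s
--
--     # Segment tree storing max on ranges of workload, to find first index with workload[idx] > cap in O(log n)
--     size = 1
--     while size < n:
--         size <<= 1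
--
--     seg = [0] * (2 * size)
--     for i in range(n):
--         seg[size + i] = int(workload[i])
--     for i in range(size - 1, 0, -1):
--         seg[i] = seg[2 * i] if seg[2 * i] > seg[2 * i + 1] else seg[2 * i + 1]
--
--     def first_index_greater_than(cap: int) -> int:
--         if n == 0:
--             return 0
--         if seg[1] <= cap:
--             return n  # all jobs fit
--
--         idx = 1
--         l, r = 0, size
--         while idx < size:
--             left = idx * 2
--             mid = (l + r) // 2
--             if seg[left] > cap:
--                 idx = left
--                 r = mid
--             else:
--                 idx = left + 1
--                 l = mid
--         pos = idx - size
--         return pos if pos < n else n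
--
--     ans: List[int] = []
--     for cap in performance:
--         j = first_index_greater_than(int(cap))
--         ans.append(prefix[j])
--     return ans
-- ===== SOURCE B (Python) =====
-- from typing import List
--
-- def _bisect_right(a: List[int], x: int) -> int:
--     lo, hi = 0, len(a)
--     while lo < hi:
--         mid = (lo + hi) // 2
--         if x < a[mid]:
--             hi = mid
--         else:
--             lo = mid + 1
--     return lo
--
-- def getMaxWorkloadDone(performance: List[int], workload: List[int]) -> List[int]:
--     # prefix sums and running maximum (non-decreasing) of workload
--     prefix = [0]
--     for w in workload:
--         prefix.append(prefix[-1] + int(w))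
--     runmax: List[int] = []
--     for w in workload:
--         w = int(w)
--         runmax.append(w if not runmax or w > runmax[-1] else runmax[-1])
--     out: List[int] = []
--     for cap in performance:
--         # first index whose prefix-maximum strictly exceeds cap
--         out.append(prefix[_bisect_right(runmax, int(cap))])
--     return out
-- ===== Notes on version B (the rewrite author's own statement) =====
-- stated objective: simpler
-- what changed: Replaces the hand-built segment tree and its per-query tree descent by a running-maximum array (non-decreasing by construction) plus an ordinary binary search (bisect_right) into it; prefix sums are kept.
import Mathlib
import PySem

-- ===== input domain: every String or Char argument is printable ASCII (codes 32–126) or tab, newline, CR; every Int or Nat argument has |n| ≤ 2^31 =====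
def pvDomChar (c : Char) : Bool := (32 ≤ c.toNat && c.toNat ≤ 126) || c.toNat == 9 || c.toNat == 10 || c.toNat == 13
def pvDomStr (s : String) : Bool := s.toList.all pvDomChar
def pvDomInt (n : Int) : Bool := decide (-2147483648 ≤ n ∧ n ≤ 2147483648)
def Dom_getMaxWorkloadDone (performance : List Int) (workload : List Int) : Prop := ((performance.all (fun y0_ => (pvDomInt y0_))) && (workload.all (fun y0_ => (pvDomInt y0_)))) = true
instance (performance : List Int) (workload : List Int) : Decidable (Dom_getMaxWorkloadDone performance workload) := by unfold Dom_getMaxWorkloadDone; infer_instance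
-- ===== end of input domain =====

-- B replaces A's hand-built segment tree (and per-cap tree descent) by a running-maximum
-- array plus a plain bisect_right binary search; objective: simpler. Return values agree on all inputs.

-- B replaces A's hand-built segment tree (and per-cap tree descent) by a running-maximum
-- array plus a bisect_right binary search; objective: simpler. Return values agree on all inputs.

-- ===== PORT A =====
-- while size < n: size <<= 1   (the 0 < size argument only justifies termination)
def growSize (n size : Nat) (h : 0 < size) : Nat :=
  if h2 : size < n then growSize n (size * 2) (by omega) else size
termination_by n - size
decreasing_by omega

-- for i, w in enumerate(workload): s += w; prefix[i+1] = s
def fillPrefix : List Int → List Int → Int → Nat → List Int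
  | [], p, _, _ => p
  | w :: t, p, s, i => fillPrefix t (p.set (i + 1) (s + w)) (s + w) (i + 1)

-- for i in range(n): seg[size+i] = workload[i]
def setLeaves (seg : List Int) (size : Nat) : List Int → Nat → List Int
  | [], _ => seg
  | w :: t, i => setLeaves (seg.set (size + i) w) size t (i + 1)

-- for i in range(size-1, 0, -1): seg[i] = seg[2i] if seg[2i] > seg[2i+1] else seg[2i+1]
def buildDown (seg : List Int) : Nat → List Int
  | 0 => seg
  | j + 1 =>
    let a := seg.getD (2 * (j + 1)) 0
    let b := seg.getD (2 * (j + 1) + 1) 0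
    buildDown (seg.set (j + 1) (if a > b then a else b)) j

-- the while-descent of first_index_greater_than (indices are provably in range, so getD is exact)
def descend (seg : List Int) (size : Nat) (cap : Int) (idx l r : Nat) (h : 0 < idx) : Nat :=
  if h2 : idx < size then
    let left := 2 * idx
    let mid := (l + r) / 2
    if seg.getD left 0 > cap then descend seg size cap left l mid (by omega)
    else descend seg size cap (left + 1) mid r (by omega)
  else idx
termination_by size - idx
decreasing_by all_goals omega

def firstIdxGT (n size : Nat) (seg : List Int) (cap : Int) : Nat :=
  if n = 0 then 0
  else if seg.getD 1 0 ≤ cap then n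
  else
    let idx := descend seg size cap 1 0 size (by omega)
    let pos := idx - size
    if pos < n then pos else n

def getMaxWorkloadDone (performance : List Int) (workload : List Int) : List Int :=
  let n := workload.length
  let pre := fillPrefix workload (List.replicate (n + 1) 0) 0 0
  let size := growSize n 1 (by omega)
  let seg0 := setLeaves (List.replicate (2 * size) 0) size workload 0
  let seg := buildDown seg0 (size - 1)
  performance.map (fun cap => pre.getD (firstIdxGT n size seg cap) 0)

-- ===== PORT B =====
-- prefix = [0]; for w in workload: prefix.append(prefix[-1] + w)
def prefixFrom (s : Int) : List Int → List Int
  | [] => []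
  | w :: t => (s + w) :: prefixFrom (s + w) t

-- runmax.append(w if not runmax or w > runmax[-1] else runmax[-1])
def runmaxAux : Option Int → List Int → List Int
  | _, [] => []
  | m, w :: t =>
    let v := match m with
      | none => w
      | some mv => if w > mv then w else mv
    v :: runmaxAux (some v) t

-- _bisect_right is the verbatim stdlib bisect_right loop, ported as PySem.List.bisectRight
def getMaxWorkloadDone_alt (performance : List Int) (workload : List Int) : List Int :=
  let pre := 0 :: prefixFrom 0 workload
  let runmax := runmaxAux none workload
  performance.map (fun cap => pre.getD (PySem.List.bisectRight runmax cap) 0)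

-- ===== PRECONDITION & SPEC =====
def Spec_getMaxWorkloadDone (performance : List Int) (workload : List Int) (out : List Int) : Prop := out = getMaxWorkloadDone_alt performance workload
instance (performance : List Int) (workload : List Int) (out : List Int) : Decidable (Spec_getMaxWorkloadDone performance workload out) := by unfold Spec_getMaxWorkloadDone; infer_instance

-- ===== CLAIM (what is proved, stated in full; the proofs are below) =====
def Claim_equal_getMaxWorkloadDone : Prop := ∀ (performance : List Int) (workload : List Int), Dom_getMaxWorkloadDone performance workload → Spec_getMaxWorkloadDone performance workload (getMaxWorkloadDone performance workload)

-- ===== LEMMAS AND PROOFS =====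

-- length of the longest prefix of ws that is ≤ cap: the index both ports compute per cap
def tw (cap : Int) (ws : List Int) : Nat := (ws.takeWhile (fun w => decide (w ≤ cap))).length

-- the max stored at node i of a perfect segment tree over the padded leaf list
def segMax (size : Nat) (padded : List Int) (i : Nat) : Int :=
  if i = 0 then 0
  else if size ≤ i then padded.getD (i - size) 0
  else max (segMax size padded (2 * i)) (segMax size padded (2 * i + 1))
termination_by 2 * size - i
decreasing_by all_goals omega

lemma growSize_spec (n : Nat) : ∀ (s : Nat) (h : 0 < s), (∃ j, s = 2 ^ j) →
    ∃ k, growSize n s h = 2 ^ k ∧ n ≤ 2 ^ k := by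
  intro s h hj
  fun_induction growSize n s h with
  | case1 s h h2 ih =>
    obtain ⟨j, rfl⟩ := hj
    exact ih ⟨j + 1, by ring⟩
  | case2 s h h2 =>
    obtain ⟨j, rfl⟩ := hj
    exact ⟨j, rfl, by omega⟩

lemma fillPrefix_eq : ∀ (t pre : List Int) (s : Int) (i : Nat), pre.length = i + 1 →
    fillPrefix t (pre ++ List.replicate t.length 0) s i = pre ++ prefixFrom s t := by
  intro t
  induction t with
  | nil => intro pre s i _; simp [fillPrefix, prefixFrom]
  | cons w t ih =>
    intro pre s i hlen
    have hset : (pre ++ List.replicate (w :: t).length 0).set (i + 1) (s + w)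
        = (pre ++ [s + w]) ++ List.replicate t.length 0 := by
      rw [List.set_append_right _ _ (by omega)]
      simp [hlen, List.replicate_succ]
    simp only [fillPrefix, hset]
    rw [ih (pre ++ [s + w]) (s + w) (i + 1) (by simp [hlen])]
    simp [prefixFrom]

lemma takeWhile_len_le (cap : Int) (ws : List Int) : tw cap ws ≤ ws.length :=
  (List.takeWhile_sublist _).length_le

lemma takeWhile_all (cap : Int) (ws : List Int)
    (h : ∀ j < ws.length, ws.getD j 0 ≤ cap) : tw cap ws = ws.length := by
  induction ws with
  | nil => rfl
  | cons w t ih =>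
    have h0 : w ≤ cap := by simpa using h 0 (by simp)
    have ht := ih (fun j hj => by simpa using h (j + 1) (by simp; omega))
    simp [tw, h0] at ht ⊢
    omega

lemma takeWhile_first (cap : Int) (ws : List Int) : ∀ (t : Nat), t < ws.length →
    (∀ j < t, ws.getD j 0 ≤ cap) → cap < ws.getD t 0 → tw cap ws = t := by
  induction ws with
  | nil => intro t ht _ _; simp at ht
  | cons w tl ih =>
    intro t ht h1 h2
    cases t with
    | zero =>
      simp only [List.getD_cons_zero] at h2
      simp [tw, show ¬ (w ≤ cap) by omega]
    | succ t' =>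
      have h0 : w ≤ cap := by simpa using h1 0 (by omega)
      have ht' := ih t' (by simpa using ht) (fun j hj => by simpa using h1 (j + 1) (by omega))
        (by simpa using h2)
      simp [tw, h0] at ht' ⊢
      omega

lemma takeWhile_prefix_le (cap : Int) (ws : List Int) :
    ∀ j < tw cap ws, ws.getD j 0 ≤ cap := by
  induction ws with
  | nil => intro j hj; simp [tw] at hj
  | cons w t ih =>
    intro j hj
    by_cases h0 : w ≤ cap
    · cases j with
      | zero => simpa
      | succ j' =>
        simp only [List.getD_cons_succ]
        apply ih
        simp only [tw, List.takeWhile_cons, decide_eq_true h0] at hj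
        exact Nat.lt_of_succ_lt_succ hj
    · simp [tw, h0] at hj

lemma takeWhile_stop (cap : Int) (ws : List Int) (h : tw cap ws < ws.length) :
    cap < ws.getD (tw cap ws) 0 := by
  induction ws with
  | nil => simp [tw] at h
  | cons w t ih =>
    by_cases h0 : w ≤ cap
    · simp [tw, h0] at h ⊢
      have := ih (by simp only [tw]; omega)
      simpa [tw] using this
    · simp [tw, h0] at h ⊢
      omega

lemma getD_set (l : List Int) (i j : Nat) (v : Int) :
    (l.set i v).getD j 0 = if i = j ∧ i < l.length then v else l.getD j 0 := by
  rcases eq_or_ne i j with rfl | hne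
  · by_cases h : i < l.length
    · simp [List.getD_eq_getElem?_getD, h]
    · have hnone : l[i]? = none := by rw [List.getElem?_eq_none]; omega
      simp [List.getD_eq_getElem?_getD, h]
  · simp [List.getD_eq_getElem?_getD, hne]

lemma setLeaves_spec (size : Nat) : ∀ (t seg : List Int) (i : Nat),
    seg.length = 2 * size → i + t.length ≤ size →
    (setLeaves seg size t i).length = 2 * size ∧
    ∀ m, (setLeaves seg size t i).getD m 0 =
      if size + i ≤ m ∧ m < size + i + t.length then t.getD (m - (size + i)) 0
      else seg.getD m 0 := by
  intro t
  induction t with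
  | nil =>
    intro seg i hlen _
    refine ⟨hlen, fun m => ?_⟩
    have hno : ¬ (size + i ≤ m ∧ m < size + i + ([] : List Int).length) := by
      rw [List.length_nil]; omega
    rw [show setLeaves seg size [] i = seg from rfl, if_neg hno]
  | cons w t ih =>
    intro seg i hlen hle
    have hle' : i + t.length + 1 ≤ size := by simp at hle; omega
    have hlen' : (seg.set (size + i) w).length = 2 * size := by simp [hlen]
    obtain ⟨hL, hG⟩ := ih (seg.set (size + i) w) (i + 1) hlen' (by omega)
    refine ⟨hL, fun m => ?_⟩
    rw [show setLeaves seg size (w :: t) i = setLeaves (seg.set (size + i) w) size t (i + 1)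
        from rfl, hG m]
    by_cases hm1 : size + (i + 1) ≤ m ∧ m < size + (i + 1) + t.length
    · have hc3 : size + i ≤ m ∧ m < size + i + (w :: t).length := by
        simp only [List.length_cons]; omega
      rw [if_pos hm1, if_pos hc3]
      have hms : m - (size + i) = (m - (size + (i + 1))) + 1 := by omega
      rw [hms, List.getD_cons_succ]
    · rw [if_neg hm1, getD_set]
      by_cases hm2 : size + i = m
      · have hr : size + i < seg.length := by rw [hlen]; omega
        rw [if_pos ⟨hm2, hr⟩, if_pos (by simp only [List.length_cons]; omega)]
        rw [← hm2, Nat.sub_self, List.getD_cons_zero]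
      · rw [if_neg (by tauto), if_neg (by simp only [List.length_cons]; omega)]

lemma buildDown_spec (size : Nat) (padded : List Int) : ∀ (j : Nat) (seg : List Int),
    seg.length = 2 * size → j < size →
    (∀ m, j < m → m < 2 * size → seg.getD m 0 = segMax size padded m) →
    (buildDown seg j).length = 2 * size ∧
    ∀ m, 0 < m → m < 2 * size → (buildDown seg j).getD m 0 = segMax size padded m := by
  intro j
  induction j with
  | zero =>
    intro seg hlen _ h
    exact ⟨hlen, fun m hm1 hm2 => h m hm1 hm2⟩
  | succ j ih =>
    intro seg hlen hj h
    have ha : seg.getD (2 * (j + 1)) 0 = segMax size padded (2 * (j + 1)) :=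
      h _ (by omega) (by omega)
    have hb : seg.getD (2 * (j + 1) + 1) 0 = segMax size padded (2 * (j + 1) + 1) :=
      h _ (by omega) (by omega)
    have hunf : segMax size padded (j + 1)
        = max (segMax size padded (2 * (j + 1))) (segMax size padded (2 * (j + 1) + 1)) := by
      rw [segMax, if_neg (by omega), if_neg (by omega)]
    have hv : (if seg.getD (2 * (j + 1)) 0 > seg.getD (2 * (j + 1) + 1) 0
          then seg.getD (2 * (j + 1)) 0 else seg.getD (2 * (j + 1) + 1) 0)
        = segMax size padded (j + 1) := by
      rw [ha, hb, hunf]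
      by_cases hc : segMax size padded (2 * (j + 1)) ≤ segMax size padded (2 * (j + 1) + 1)
      · rw [if_neg (by omega), max_eq_right hc]
      · rw [if_pos (by omega), max_eq_left (by omega)]
    have hstep := ih (seg.set (j + 1) (if seg.getD (2 * (j + 1)) 0 > seg.getD (2 * (j + 1) + 1) 0
          then seg.getD (2 * (j + 1)) 0 else seg.getD (2 * (j + 1) + 1) 0))
      (by simp [hlen]) (by omega) (fun m hm1 hm2 => by
        rw [getD_set]
        by_cases he : j + 1 = m
        · rw [if_pos ⟨he, by omega⟩, ← he, hv]
        · rw [if_neg (by tauto)]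
          exact h m (by omega) hm2)
    simpa [buildDown] using hstep

lemma segMax_le_iff (k : Nat) (padded : List Int) (cap : Int) :
    ∀ (c d idx : Nat), k - d = c → d ≤ k → 2 ^ d ≤ idx → idx < 2 ^ (d + 1) →
    (segMax (2 ^ k) padded idx ≤ cap ↔
      ∀ j, (idx - 2 ^ d) * 2 ^ (k - d) ≤ j → j < (idx - 2 ^ d) * 2 ^ (k - d) + 2 ^ (k - d) →
        padded.getD j 0 ≤ cap) := by
  intro c
  induction c with
  | zero =>
    intro d idx hc hdk hlo hhi
    have hdk' : d = k := by omega
    subst hdk'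
    have hp : 0 < 2 ^ d := Nat.two_pow_pos d
    rw [hc, pow_zero, mul_one, segMax, if_neg (by omega), if_pos hlo]
    constructor
    · intro h j hj1 hj2
      have hj : j = idx - 2 ^ d := by omega
      rw [hj]; exact h
    · intro h
      exact h _ (le_refl _) (by omega)
  | succ c ih =>
    intro d idx hc hdk hlo hhi
    have hdk2 : d < k := by omega
    have hp : 0 < 2 ^ d := Nat.two_pow_pos d
    have hidx0 : ¬ (idx = 0) := by omega
    have hidxlt : idx < 2 ^ k :=
      lt_of_lt_of_le hhi (Nat.pow_le_pow_right (by omega) (by omega))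
    rw [segMax, if_neg hidx0, if_neg (by omega), max_le_iff]
    have e2 : k - (d + 1) = c := by omega
    have epow : 2 ^ (k - d) = 2 * 2 ^ c := by
      rw [show k - d = c + 1 from hc, pow_succ]; ring
    have hL := ih (d + 1) (2 * idx) (by omega) (by omega)
      (by rw [pow_succ]; omega) (by rw [pow_succ]; omega)
    have hR := ih (d + 1) (2 * idx + 1) (by omega) (by omega)
      (by rw [pow_succ]; omega) (by rw [pow_succ]; omega)
    rw [e2] at hL hR
    have lL : (2 * idx - 2 ^ (d + 1)) * 2 ^ c = (idx - 2 ^ d) * 2 ^ (k - d) := by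
      rw [epow, pow_succ]
      have h2 : 2 * idx - 2 ^ d * 2 = 2 * (idx - 2 ^ d) := by omega
      rw [h2]; ring
    have lR : (2 * idx + 1 - 2 ^ (d + 1)) * 2 ^ c = (idx - 2 ^ d) * 2 ^ (k - d) + 2 ^ c := by
      rw [epow, pow_succ]
      have h2 : 2 * idx + 1 - 2 ^ d * 2 = 2 * (idx - 2 ^ d) + 1 := by omega
      rw [h2]; ring
    rw [hL, hR, lL, lR]
    constructor
    · rintro ⟨h1, h2⟩ j hj1 hj2
      rcases lt_or_ge j ((idx - 2 ^ d) * 2 ^ (k - d) + 2 ^ c) with hj | hj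
      · exact h1 j hj1 hj
      · exact h2 j hj (by omega)
    · intro h
      exact ⟨fun j hj1 hj2 => h j hj1 (by omega), fun j hj1 hj2 => h j (by omega) (by omega)⟩

lemma descend_spec (k : Nat) (padded : List Int) (cap : Int) (seg : List Int)
    (hseg : ∀ m, 0 < m → m < 2 * 2 ^ k → seg.getD m 0 = segMax (2 ^ k) padded m) :
    ∀ (c d idx : Nat) (h0 : 0 < idx), k - d = c → d ≤ k → 2 ^ d ≤ idx → idx < 2 ^ (d + 1) →
    cap < segMax (2 ^ k) padded idx →
    (∀ j, j < (idx - 2 ^ d) * 2 ^ (k - d) → padded.getD j 0 ≤ cap) →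
    ∃ t, descend seg (2 ^ k) cap idx ((idx - 2 ^ d) * 2 ^ (k - d))
        ((idx - 2 ^ d) * 2 ^ (k - d) + 2 ^ (k - d)) h0 = 2 ^ k + t ∧
      t < 2 ^ k ∧ cap < padded.getD t 0 ∧ ∀ j, j < t → padded.getD j 0 ≤ cap := by
  intro c
  induction c with
  | zero =>
    intro d idx h0 hc hdk hlo hhi hcap hpre
    have hp : 0 < 2 ^ d := Nat.two_pow_pos d
    have h21 : (2 : Nat) ^ (d + 1) = 2 * 2 ^ d := by rw [pow_succ]; ring
    have hsz : (2 : Nat) ^ k = 2 ^ d := by rw [show k = d by omega]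
    rw [hc, pow_zero, mul_one] at hpre ⊢
    rw [hsz] at hcap ⊢
    rw [segMax, if_neg (by omega), if_pos hlo] at hcap
    refine ⟨idx - 2 ^ d, ?_, by omega, hcap, hpre⟩
    rw [descend, dif_neg (by omega)]
    omega
  | succ c ih =>
    intro d idx h0 hc hdk hlo hhi hcap hpre
    have hdk2 : d < k := by omega
    have hp : 0 < 2 ^ d := Nat.two_pow_pos d
    have hpc : 0 < 2 ^ c := Nat.two_pow_pos c
    have hidxlt : idx < 2 ^ k :=
      lt_of_lt_of_le hhi (Nat.pow_le_pow_right (by omega) (by omega))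
    have e2 : k - (d + 1) = c := by omega
    have epow : 2 ^ (k - d) = 2 * 2 ^ c := by
      rw [show k - d = c + 1 from hc, pow_succ]; ring
    have lL : (2 * idx - 2 ^ (d + 1)) * 2 ^ c = (idx - 2 ^ d) * 2 ^ (k - d) := by
      rw [epow, pow_succ]
      have h2 : 2 * idx - 2 ^ d * 2 = 2 * (idx - 2 ^ d) := by omega
      rw [h2]; ring
    have lR : (2 * idx + 1 - 2 ^ (d + 1)) * 2 ^ c = (idx - 2 ^ d) * 2 ^ (k - d) + 2 ^ c := by
      rw [epow, pow_succ]
      have h2 : 2 * idx + 1 - 2 ^ d * 2 = 2 * (idx - 2 ^ d) + 1 := by omega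
      rw [h2]; ring
    have hval : seg.getD (2 * idx) 0 = segMax (2 ^ k) padded (2 * idx) :=
      hseg _ (by omega) (by omega)
    have hmid : ((idx - 2 ^ d) * 2 ^ (k - d) + ((idx - 2 ^ d) * 2 ^ (k - d) + 2 ^ (k - d))) / 2
        = (idx - 2 ^ d) * 2 ^ (k - d) + 2 ^ c := by omega
    have hunf : segMax (2 ^ k) padded idx
        = max (segMax (2 ^ k) padded (2 * idx)) (segMax (2 ^ k) padded (2 * idx + 1)) := by
      rw [segMax, if_neg (by omega), if_neg (by omega)]
    rw [descend, dif_pos hidxlt]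
    simp only [hmid, hval]
    by_cases hgt : cap < segMax (2 ^ k) padded (2 * idx)
    · rw [if_pos hgt]
      have hrec := ih (d + 1) (2 * idx) (by omega) (by omega) (by omega)
        (by rw [pow_succ]; omega) (by rw [pow_succ]; omega) hgt
        (by rw [e2, lL]; exact hpre)
      rw [e2, lL] at hrec
      exact hrec
    · rw [if_neg hgt]
      have hle : segMax (2 ^ k) padded (2 * idx) ≤ cap := by omega
      have hcapR : cap < segMax (2 ^ k) padded (2 * idx + 1) := by
        rw [hunf] at hcap
        rcases max_cases (segMax (2 ^ k) padded (2 * idx)) (segMax (2 ^ k) padded (2 * idx + 1)) with ⟨he, _⟩ | ⟨he, _⟩ <;> omega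
      have hfill := (segMax_le_iff k padded cap c (d + 1) (2 * idx) (by omega) (by omega)
        (by rw [pow_succ]; omega) (by rw [pow_succ]; omega)).mp hle
      rw [e2, lL] at hfill
      have hpre2 : ∀ j, j < (idx - 2 ^ d) * 2 ^ (k - d) + 2 ^ c → padded.getD j 0 ≤ cap := by
        intro j hj
        rcases lt_or_ge j ((idx - 2 ^ d) * 2 ^ (k - d)) with hj2 | hj2
        · exact hpre j hj2
        · exact hfill j hj2 (by omega)
      have hrec := ih (d + 1) (2 * idx + 1) (by omega) (by omega) (by omega)
        (by rw [pow_succ]; omega) (by rw [pow_succ]; omega) hcapR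
        (by rw [e2, lR]; exact hpre2)
      rw [e2, lR] at hrec
      have harg : (idx - 2 ^ d) * 2 ^ (k - d) + 2 ^ c + 2 ^ c
          = (idx - 2 ^ d) * 2 ^ (k - d) + 2 ^ (k - d) := by omega
      rw [harg] at hrec
      exact hrec

lemma runmax_length : ∀ (t : List Int) (m : Option Int), (runmaxAux m t).length = t.length := by
  intro t
  induction t with
  | nil => intro m; rfl
  | cons w t ih => intro m; simp [runmaxAux, ih]

lemma runmax_ge_carry : ∀ (t : List Int) (v : Int) (j : Nat), j < t.length →
    v ≤ (runmaxAux (some v) t).getD j 0 := by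
  intro t
  induction t with
  | nil => intro v j hj; simp at hj
  | cons w t ih =>
    intro v j hj
    cases j with
    | zero => simp [runmaxAux]; split_ifs <;> omega
    | succ j' =>
      have h1 : (if w > v then w else v) ≤ (runmaxAux (some (if w > v then w else v)) t).getD j' 0 :=
        ih _ j' (by simpa using hj)
      have h2 : v ≤ (if w > v then w else v) := by split_ifs <;> omega
      calc v ≤ _ := h2
        _ ≤ _ := h1
        _ = (runmaxAux (some v) (w :: t)).getD (j' + 1) 0 := by simp [runmaxAux]

lemma runmax_ge_elem : ∀ (t : List Int) (m : Option Int) (j : Nat), j < t.length →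
    t.getD j 0 ≤ (runmaxAux m t).getD j 0 := by
  intro t
  induction t with
  | nil => intro m j hj; simp at hj
  | cons w t ih =>
    intro m j hj
    cases j with
    | zero =>
      cases m with
      | none => simp [runmaxAux]
      | some mv => simp [runmaxAux]; split_ifs <;> omega
    | succ j' =>
      cases m with
      | none =>
        have := ih (some w) j' (by simpa using hj)
        simpa [runmaxAux] using this
      | some mv =>
        have := ih (some (if w > mv then w else mv)) j' (by simpa using hj)
        simpa [runmaxAux] using this

lemma runmax_le : ∀ (t : List Int) (m : Option Int) (c : Int) (j : Nat), j < t.length →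
    (∀ i, i ≤ j → t.getD i 0 ≤ c) → (∀ mv, m = some mv → mv ≤ c) →
    (runmaxAux m t).getD j 0 ≤ c := by
  intro t
  induction t with
  | nil => intro m c j hj; simp at hj
  | cons w t ih =>
    intro m c j hj hall hm
    have hw : w ≤ c := by simpa using hall 0 (by omega)
    cases m with
    | none =>
      cases j with
      | zero => simpa [runmaxAux] using hw
      | succ j' =>
        have := ih (some w) c j' (by simpa using hj)
          (fun i hi => by simpa using hall (i + 1) (by omega))
          (fun mv hmv => by cases hmv; exact hw)
        simpa [runmaxAux] using this
    | some mv =>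
      have hv : (if w > mv then w else mv) ≤ c := by
        have := hm mv rfl; split_ifs <;> omega
      cases j with
      | zero => simpa [runmaxAux] using hv
      | succ j' =>
        have := ih (some (if w > mv then w else mv)) c j' (by simpa using hj)
          (fun i hi => by simpa using hall (i + 1) (by omega))
          (fun mv' hmv' => by cases hmv'; exact hv)
        simpa [runmaxAux] using this

lemma runmax_pairwise : ∀ (t : List Int) (m : Option Int),
    List.Pairwise (· ≤ ·) (runmaxAux m t) := by
  intro t
  induction t with
  | nil => intro m; simp [runmaxAux]
  | cons w t ih =>
    intro m
    have key : ∀ v : Int, List.Pairwise (· ≤ ·) (v :: runmaxAux (some v) t) := by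
      intro v
      constructor
      · intro y hy
        obtain ⟨j, hj, rfl⟩ := List.mem_iff_getElem.mp hy
        have hlen : j < t.length := by simpa [runmax_length] using hj
        have h := runmax_ge_carry t v j hlen
        rwa [List.getD_eq_getElem _ _ hj] at h
      · exact ih (some v)
    cases m with
    | none => simpa [runmaxAux] using key w
    | some mv => simpa [runmaxAux] using key (if w > mv then w else mv)

lemma getD_replicate (p i : Nat) : (List.replicate p (0 : Int)).getD i 0 = 0 := by
  rw [List.getD_eq_getElem?_getD, List.getElem?_replicate]
  split <;> simp

lemma padded_getD_lt (ws rest : List Int) (j : Nat) (hj : j < ws.length) :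
    (ws ++ rest).getD j 0 = ws.getD j 0 := by
  rw [List.getD_eq_getElem?_getD, List.getD_eq_getElem?_getD, List.getElem?_append_left hj]

lemma padded_getD_ge (ws : List Int) (p j : Nat) (hj : ws.length ≤ j) :
    (ws ++ List.replicate p (0 : Int)).getD j 0 = 0 := by
  rw [List.getD_eq_getElem?_getD, List.getElem?_append_right hj, List.getElem?_replicate]
  split <;> simp

lemma firstIdxGT_eq (ws : List Int) (k : Nat) (cap : Int) (seg : List Int)
    (hn : ws.length ≤ 2 ^ k)
    (hseg : ∀ m, 0 < m → m < 2 * 2 ^ k →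
      seg.getD m 0 = segMax (2 ^ k) (ws ++ List.replicate (2 ^ k - ws.length) 0) m) :
    firstIdxGT ws.length (2 ^ k) seg cap = tw cap ws := by
  have hp : 0 < 2 ^ k := Nat.two_pow_pos k
  set padded := ws ++ List.replicate (2 ^ k - ws.length) 0 with hpad
  by_cases h0 : ws.length = 0
  · simp only [firstIdxGT, if_pos h0]
    cases ws with
    | nil => rfl
    | cons a t => simp at h0
  · simp only [firstIdxGT, if_neg h0]
    have hseg1 : seg.getD 1 0 = segMax (2 ^ k) padded 1 := hseg 1 (by omega) (by omega)
    have hiff := segMax_le_iff k padded cap k 0 1 (by omega) (by omega) (by norm_num) (by norm_num)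
    norm_num at hiff
    by_cases hle : seg.getD 1 0 ≤ cap
    · rw [if_pos hle]
      rw [hseg1] at hle
      have hall := hiff.mp hle
      refine (takeWhile_all cap ws ?_).symm
      intro j hj
      have h := hall j (by omega)
      rw [← List.getD_eq_getElem?_getD] at h
      rwa [hpad, padded_getD_lt ws _ j hj] at h
    · rw [if_neg hle]
      rw [hseg1] at hle
      obtain ⟨t, hres, htlt, htgt, htpre⟩ := descend_spec k padded cap seg hseg k 0 1 (by omega)
        (by omega) (by omega) (by norm_num) (by norm_num) (by omega)
        (by intro j hj; norm_num at hj)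
      norm_num at hres
      rw [hres]
      have ht2 : 2 ^ k + t - 2 ^ k = t := by omega
      rw [ht2]
      by_cases htn : t < ws.length
      · rw [if_pos htn]
        refine (takeWhile_first cap ws t htn ?_ ?_).symm
        · intro j hj
          have h := htpre j hj
          rwa [hpad, padded_getD_lt ws _ j (by omega)] at h
        · rwa [hpad, padded_getD_lt ws _ t htn] at htgt
      · rw [if_neg htn]
        refine (takeWhile_all cap ws ?_).symm
        intro j hj
        have h := htpre j (by omega)
        rwa [hpad, padded_getD_lt ws _ j hj] at h

lemma bisect_eq_tw (ws : List Int) (cap : Int) :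
    PySem.List.bisectRight (runmaxAux none ws) cap = tw cap ws := by
  have hlen : (runmaxAux none ws).length = ws.length := runmax_length ws none
  obtain ⟨hle, hlt, hgt⟩ := PySem.List.bisectRight_spec (runmaxAux none ws) cap
    (runmax_pairwise ws none)
  set br := PySem.List.bisectRight (runmaxAux none ws) cap with hbr
  have htw_le := takeWhile_len_le cap ws
  rcases lt_trichotomy br (tw cap ws) with h | h | h
  · exfalso
    have hbrn : br < ws.length := by omega
    have h1 : cap < (runmaxAux none ws).getD br 0 := by
      have hg := hgt br (by omega) (le_refl br)
      rwa [List.getD_eq_getElem _ _ (by omega)]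
    have h2 : (runmaxAux none ws).getD br 0 ≤ cap :=
      runmax_le ws none cap br (by omega)
        (fun i hi => takeWhile_prefix_le cap ws i (by omega))
        (fun mv hmv => by cases hmv)
    omega
  · exact h
  · exfalso
    have htn : tw cap ws < ws.length := by omega
    have h1 : (runmaxAux none ws).getD (tw cap ws) 0 ≤ cap := by
      have hl := hlt (tw cap ws) (by omega) h
      rwa [List.getD_eq_getElem _ _ (by omega)]
    have h2 : ws.getD (tw cap ws) 0 ≤ (runmaxAux none ws).getD (tw cap ws) 0 :=
      runmax_ge_elem ws none _ htn
    have h3 := takeWhile_stop cap ws htn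
    omega

-- ===== VERDICT (by name: the statement is the Claim_ definition above) =====
theorem getMaxWorkloadDone_spec : Claim_equal_getMaxWorkloadDone := by
  intro performance workload _
  unfold Spec_getMaxWorkloadDone
  obtain ⟨k, hk, hnk⟩ := growSize_spec workload.length 1 (by omega) ⟨0, rfl⟩
  have hp : 0 < 2 ^ k := Nat.two_pow_pos k
  simp only [getMaxWorkloadDone, getMaxWorkloadDone_alt]
  rw [hk]
  have hpre : fillPrefix workload (List.replicate (workload.length + 1) 0) 0 0
      = [0] ++ prefixFrom 0 workload := by
    have h := fillPrefix_eq workload [0] 0 0 (by simp)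
    rwa [show ([0] : List Int) ++ List.replicate workload.length 0
        = List.replicate (workload.length + 1) 0 from by simp [List.replicate_succ]] at h
  rw [hpre]
  obtain ⟨hL0, hG0⟩ := setLeaves_spec (2 ^ k) workload (List.replicate (2 * 2 ^ k) 0) 0
    (by simp) (by omega)
  simp only [Nat.add_zero] at hG0
  have hinit : ∀ m, 2 ^ k - 1 < m → m < 2 * 2 ^ k →
      (setLeaves (List.replicate (2 * 2 ^ k) 0) (2 ^ k) workload 0).getD m 0
        = segMax (2 ^ k) (workload ++ List.replicate (2 ^ k - workload.length) 0) m := by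
    intro m hm1 hm2
    have hm1' : 2 ^ k ≤ m := by omega
    have hm0 : ¬ (m = 0) := by omega
    have hsm : segMax (2 ^ k) (workload ++ List.replicate (2 ^ k - workload.length) 0) m
        = (workload ++ List.replicate (2 ^ k - workload.length) 0).getD (m - 2 ^ k) 0 := by
      rw [segMax, if_neg hm0, if_pos hm1']
    rw [hG0 m, hsm]
    by_cases hc : 2 ^ k ≤ m ∧ m < 2 ^ k + workload.length
    · rw [if_pos hc, padded_getD_lt workload _ _ (by omega)]
    · rw [if_neg hc, padded_getD_ge workload _ _ (by omega), getD_replicate]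
  obtain ⟨hLlen, hGfin⟩ := buildDown_spec (2 ^ k)
    (workload ++ List.replicate (2 ^ k - workload.length) 0) (2 ^ k - 1) _ hL0 (by omega) hinit
  simp only [List.map_inj_left]
  intro cap _
  rw [firstIdxGT_eq workload k cap _ hnk hGfin, bisect_eq_tw]
  rfl
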